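-- pv_equiv track=rewrite | github.com/DKMaCS/etl_app | sessions/session3.py | check_containment
-- ===== SOURCE A (Python) =====
-- from collections import Counter
--
-- def check_containment(input_string, lookup_string):
--     """ Function checks if input_string has enough letters to
--         construct lookup_string
--
--     param input_string: str
--         phrase containing letters available to
--         lookup_string
--     param lookup_string: str
--         phrase to check in input_string counts
--     return: bool, bool
--         True if input_string has enough letters for lookup_string
--         or if lookup_string is physically in input_string as given;
--         False otherwise
--     """
--     # Note: this function finds if there are enough letters
--     # in input_string to construct lookup_string and if
--     # input_string physically holds lookup_string as given.
--     # This is why it returns two booleans rather than one.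
--     input_string_letter_freq = Counter(input_string)
--     lookup_string_letter_freq = Counter(lookup_string)
--     enough_letters = True
--     for letter, count in lookup_string_letter_freq.items():
--         if letter not in input_string_letter_freq.keys() or \
--                 count > input_string_letter_freq[letter]:
--             enough_letters = False
--     return enough_letters, lookup_string in input_string
-- ===== SOURCE B (Python) =====
-- def check_containment(input_string, lookup_string):
--     """Greedy consumption: cross off each lookup letter from a pool of the
--     input's letters; enough letters iff every letter can be crossed off."""
--     pool = list(input_string)
--     enough_letters = True
--     for ch in lookup_string:
--         if ch in pool:
--             pool.remove(ch)
--         else: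
--             enough_letters = False
--             break
--     return enough_letters, lookup_string in input_string
-- ===== Notes on version B (the rewrite author's own statement) =====
-- stated objective: alternative
-- what changed: Replaced A's frequency-table comparison (build Counters of both strings, then compare counts per distinct lookup letter) by a greedy consumption algorithm: walk the lookup string once, crossing each letter off a mutable pool of the input's letters, and fail as soon as a letter cannot be crossed off; no counts are ever computed.
import Mathlib
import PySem

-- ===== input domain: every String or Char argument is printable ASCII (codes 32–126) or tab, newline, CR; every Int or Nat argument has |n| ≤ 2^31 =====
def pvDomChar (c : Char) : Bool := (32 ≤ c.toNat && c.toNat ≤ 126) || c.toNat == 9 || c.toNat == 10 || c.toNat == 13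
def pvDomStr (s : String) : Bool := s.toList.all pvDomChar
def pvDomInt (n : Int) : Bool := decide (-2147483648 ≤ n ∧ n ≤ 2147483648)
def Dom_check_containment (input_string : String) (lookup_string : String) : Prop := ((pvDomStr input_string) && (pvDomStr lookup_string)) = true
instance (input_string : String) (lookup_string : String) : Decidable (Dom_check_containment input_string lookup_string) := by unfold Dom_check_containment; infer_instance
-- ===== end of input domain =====

-- B replaces A's Counter frequency tables by a greedy consumption loop that crosses each
-- lookup letter off a pool of the input's letters (objective: alternative; B mutates only
-- its local pool list, neither version mutates an argument).

-- ===== PORT A =====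
def check_containment (input_string : String) (lookup_string : String) : Bool × Bool :=
  let input_string_letter_freq := PySem.Dict.counter input_string.toList
  let lookup_string_letter_freq := PySem.Dict.counter lookup_string.toList
  let enough_letters := lookup_string_letter_freq.items.foldl
    (fun acc p =>
      if !(input_string_letter_freq.contains p.1)
          || (input_string_letter_freq.getD p.1 0 < p.2) then false else acc)
    true
  (enough_letters, PySem.Str.isIn lookup_string input_string)

-- ===== PORT B =====
-- the 'for ch in lookup_string' loop with its break and the mutable pool, as a recursion
-- over the lookup characters carrying the pool; pool.remove(ch) runs only after the
-- membership check, so PySem.List.remove? is some and .getD pool is the removal result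
def pvConsume : List Char → List Char → Bool
  | [], _ => true
  | c :: rest, pool =>
      if pool.contains c then pvConsume rest ((PySem.List.remove? pool c).getD pool)
      else false

def check_containment_alt (input_string : String) (lookup_string : String) : Bool × Bool :=
  (pvConsume lookup_string.toList input_string.toList,
   PySem.Str.isIn lookup_string input_string)

-- ===== PRECONDITION & SPEC =====
def Spec_check_containment (input_string : String) (lookup_string : String) (out : Bool × Bool) : Prop := out = check_containment_alt input_string lookup_string
instance (input_string : String) (lookup_string : String) (out : Bool × Bool) : Decidable (Spec_check_containment input_string lookup_string out) := by unfold Spec_check_containment; infer_instance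

-- ===== CLAIM =====
def Claim_equal_check_containment : Prop := ∀ (input_string : String) (lookup_string : String), Dom_check_containment input_string lookup_string → Spec_check_containment input_string lookup_string (check_containment input_string lookup_string)

-- ===== LEMMAS AND PROOFS =====

-- A's loop only ever turns the accumulator off: it computes acc && all (!test).
theorem foldl_if_false_eq_all {a : Type} (l : List a) (p : a → Bool) (acc : Bool) :
    l.foldl (fun a x => if p x then false else a) acc = (acc && l.all (fun x => !p x)) := by
  induction l generalizing acc with
  | nil => simp
  | cons x xs ih =>
      rw [List.foldl_cons, ih]
      by_cases h : p x = true <;> simp [h]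

-- greedy consumption succeeds iff every letter's multiplicity is available
theorem pvConsume_iff (l p : List Char) :
    pvConsume l p = true ↔ ∀ a, l.count a ≤ p.count a := by
  induction l generalizing p with
  | nil => simp [pvConsume]
  | cons c rest ih =>
      by_cases hc : c ∈ p
      · have h1 : 1 ≤ p.count c := List.count_pos_iff.mpr hc
        rw [pvConsume, if_pos (by simpa using hc),
          PySem.List.remove?_eq_some_erase p c hc, Option.getD_some, ih]
        constructor
        · intro h a
          have hthis := h a
          by_cases hac : a = c
          · subst hac
            rw [List.count_erase_self] at hthis
            rw [List.count_cons_self]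
            omega
          · rw [List.count_erase_of_ne hac] at hthis
            rw [List.count_cons_of_ne (Ne.symm hac)]
            exact hthis
        · intro h a
          by_cases hac : a = c
          · subst hac
            have hthis := h a
            rw [List.count_cons_self] at hthis
            rw [List.count_erase_self]
            omega
          · have hthis := h a
            rw [List.count_cons_of_ne (Ne.symm hac)] at hthis
            rw [List.count_erase_of_ne hac]
            exact hthis
      · rw [pvConsume, if_neg (by simpa using hc)]
        refine ⟨fun h => absurd h (by simp), fun h => absurd (h c) ?_⟩
        rw [List.count_cons_self, List.count_eq_zero.mpr hc]
        omega

-- A's loop result, characterised the same way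
theorem a_enough_iff (s l : List Char) :
    (PySem.Dict.counter l).items.foldl
      (fun acc p =>
        if !((PySem.Dict.counter s).contains p.1)
            || ((PySem.Dict.counter s).getD p.1 0 < p.2) then false else acc)
      true = true ↔ ∀ a, l.count a ≤ s.count a := by
  rw [foldl_if_false_eq_all, Bool.true_and, PySem.Dict.items_counter, List.all_map,
    List.all_eq_true]
  constructor
  · intro h a
    by_cases ha : a ∈ l
    · have := h a ((PySem.Set.mem_ofList _ _).mpr ha)
      simp only [Function.comp, PySem.Dict.getD_counter, Bool.not_or, Bool.and_eq_true,
        Bool.not_eq_true', decide_eq_false_iff_not, not_lt] at this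
      exact_mod_cast this.2
    · simp [List.count_eq_zero.mpr ha]
  · intro h x hx
    have hmem : x ∈ l := (PySem.Set.mem_ofList _ _).mp hx
    have hxs : x ∈ s := by
      have := h x
      have h1 : 1 ≤ l.count x := List.count_pos_iff.mpr hmem
      exact List.count_pos_iff.mp (by omega)
    simp only [Function.comp, PySem.Dict.getD_counter, PySem.Dict.contains_counter,
      Bool.not_or, Bool.and_eq_true, Bool.not_eq_true',
      decide_eq_false_iff_not, not_lt]
    exact ⟨by simpa using hxs, by exact_mod_cast h x⟩

-- ===== VERDICT =====
theorem check_containment_spec : Claim_equal_check_containment := by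
  intro s l _
  unfold Spec_check_containment check_containment check_containment_alt
  refine Prod.ext ?_ rfl
  show _ = pvConsume l.toList s.toList
  rw [Bool.eq_iff_iff, a_enough_iff, pvConsume_iff]
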